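-- pv_equiv track=rewrite | github.com/narious/CTF | DachshundAttack/dachshund_attack.py | determine_aterms
-- ===== SOURCE A (Python) =====
-- def determine_aterms(N, e, n_terms):
--     a_terms = []
--     numer = e
--     denom = N
--     for i in range(n_terms):
--         a_terms.append(numer // denom)
--         if (numer % denom) == 0:
--             break
--         temp = numer
--         numer = denom
--         denom = temp % denom
--     return a_terms
-- ===== SOURCE B (Python) =====
-- def determine_aterms(N, e, n_terms):
--     def go(numer, denom, remaining):
--         if remaining <= 0:
--             return []
--         q, r = divmod(numer, denom)
--         if r == 0:
--             return [q]
--         return [q] + go(denom, r, remaining - 1)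
--     return go(e, N, n_terms)
-- ===== Notes on version B (the rewrite author's own statement) =====
-- stated objective: alternative
-- what changed: Replaced the imperative accumulator loop with explicit state rotation by a recursive helper go(numer, denom, remaining) that mirrors the continued-fraction definition, building the list front-to-back by consing the quotient onto the recursion on (denom, numer % denom).
import Mathlib
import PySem

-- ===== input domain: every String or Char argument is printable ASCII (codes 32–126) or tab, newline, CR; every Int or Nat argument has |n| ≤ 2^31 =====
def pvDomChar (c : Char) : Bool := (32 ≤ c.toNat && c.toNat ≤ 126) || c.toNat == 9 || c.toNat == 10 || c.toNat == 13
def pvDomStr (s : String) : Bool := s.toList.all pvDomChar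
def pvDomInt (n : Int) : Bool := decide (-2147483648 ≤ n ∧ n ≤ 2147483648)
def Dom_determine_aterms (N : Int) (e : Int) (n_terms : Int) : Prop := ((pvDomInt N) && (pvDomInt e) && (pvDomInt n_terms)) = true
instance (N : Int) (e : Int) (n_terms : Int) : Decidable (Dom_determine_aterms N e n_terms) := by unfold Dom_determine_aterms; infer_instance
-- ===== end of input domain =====

-- B replaces A's accumulator loop with state rotation by a recursive continued-fraction
-- helper consing each quotient onto the recursion on (denom, numer % denom); same cost.

-- ===== PORT A =====
-- the for-loop of A: fuel = remaining iterations of range(n_terms), acc = a_terms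
def detALoop (numer denom : Int) (fuel : Nat) (acc : List Int) : List Int :=
  match fuel with
  | 0 => acc
  | f + 1 =>
    let acc' := acc ++ [PySem.Int.floordiv numer denom]
    if PySem.Int.mod numer denom == 0 then acc'
    else detALoop denom (PySem.Int.mod numer denom) f acc'

def determine_aterms (N : Int) (e : Int) (n_terms : Int) : List Int :=
  detALoop e N n_terms.toNat []

-- ===== PORT B =====
def detGo (numer denom remaining : Int) : List Int :=
  if h : remaining ≤ 0 then []
  else
    let q := PySem.Int.floordiv numer denom
    let r := PySem.Int.mod numer denom
    if r == 0 then [q]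
    else q :: detGo denom r (remaining - 1)
termination_by remaining.toNat
decreasing_by omega

def determine_aterms_alt (N : Int) (e : Int) (n_terms : Int) : List Int :=
  detGo e N n_terms

-- ===== PRECONDITION & SPEC =====
-- Pre_ excludes exactly the inputs where A raises ZeroDivisionError: N = 0 with n_terms ≥ 1.
def Pre_determine_aterms (N : Int) (e : Int) (n_terms : Int) : Prop := N ≠ 0 ∨ n_terms ≤ 0
instance (N : Int) (e : Int) (n_terms : Int) : Decidable (Pre_determine_aterms N e n_terms) := by
  unfold Pre_determine_aterms; infer_instance
def pvWitness_determine_aterms : Int × Int × Int := (3, 10, 5)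

def Spec_determine_aterms (N : Int) (e : Int) (n_terms : Int) (out : List Int) : Prop := out = determine_aterms_alt N e n_terms
instance (N : Int) (e : Int) (n_terms : Int) (out : List Int) : Decidable (Spec_determine_aterms N e n_terms out) := by unfold Spec_determine_aterms; infer_instance

-- ===== CLAIM (what is proved, stated in full; the proofs are below) =====
def Claim_equal_determine_aterms : Prop := ∀ (N : Int) (e : Int) (n_terms : Int), Dom_determine_aterms N e n_terms → Pre_determine_aterms N e n_terms → Spec_determine_aterms N e n_terms (determine_aterms N e n_terms)

-- ===== LEMMAS AND PROOFS =====
theorem detGo_unfold (numer denom remaining : Int) (h : ¬ remaining ≤ 0) :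
    detGo numer denom remaining =
      (if PySem.Int.mod numer denom == 0 then [PySem.Int.floordiv numer denom]
       else PySem.Int.floordiv numer denom :: detGo denom (PySem.Int.mod numer denom) (remaining - 1)) := by
  rw [detGo]
  simp [h]

theorem detALoop_eq_go (fuel : Nat) :
    ∀ (numer denom : Int) (acc : List Int),
      detALoop numer denom fuel acc = acc ++ detGo numer denom (fuel : Int) := by
  induction fuel with
  | zero =>
    intro numer denom acc
    simp [detALoop, detGo]
  | succ f ih =>
    intro numer denom acc
    have hpos : ¬ ((f + 1 : Nat) : Int) ≤ 0 := by push_cast; omega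
    rw [detALoop, detGo_unfold _ _ _ hpos]
    by_cases h : PySem.Int.mod numer denom == 0
    · simp [h]
    · have : ((f + 1 : Nat) : Int) - 1 = (f : Int) := by push_cast; omega
      simp only [h, this, ih]
      simp

theorem go_toNat (numer denom : Int) (n : Int) :
    detGo numer denom (n.toNat : Int) = detGo numer denom n := by
  by_cases h : n ≤ 0
  · have h1 : (n.toNat : Int) = 0 := by omega
    rw [h1, detGo, detGo]
    simp [h]
  · have : (n.toNat : Int) = n := by omega
    rw [this]

-- ===== VERDICT (by name: the statement is the Claim_ definition above) =====
theorem determine_aterms_spec : Claim_equal_determine_aterms := by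
  intro N e n _ _
  unfold Spec_determine_aterms determine_aterms determine_aterms_alt
  rw [detALoop_eq_go, go_toNat]
  simp
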